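-- pv_equiv track=rewrite | github.com/vimkim/dotfiles | private_dot_config/my-scripts/bin/executable_stack-viewer.py | simplify_trace
-- ===== SOURCE A (Python) =====
-- def simplify_trace(lines: list[str]) -> list[str]:
--     simplified = []
--     i = 0
--     while i < len(lines):
--         line = lines[i]
--         if line.lstrip().startswith("#"):
--             header_line = line
--             j = i + 1
--             snippet_found = False
--             while j < len(lines) and not lines[j].lstrip().startswith("#"):
--                 snippet_found = True
--                 j += 1
--             if snippet_found:
--                 simplified.append(header_line + " ....")
--             else:
--                 simplified.append(header_line)
--             i = j
--         else:
--             i += 1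
--     return simplified
-- ===== SOURCE B (Python) =====
-- def simplify_trace(lines: list[str]) -> list[str]:
--     simplified = []
--     current_header = None
--     has_snippet = False
--     for line in lines:
--         if line.lstrip().startswith("#"):
--             if current_header is not None:
--                 simplified.append(current_header + " ...." if has_snippet else current_header)
--             current_header = line
--             has_snippet = False
--         elif current_header is not None:
--             has_snippet = True
--     if current_header is not None:
--         simplified.append(current_header + " ...." if has_snippet else current_header)
--     return simplified
-- ===== Notes on version B (the rewrite author's own statement) =====
-- stated objective: simpler
-- what changed: Replaces A's index-based outer loop with a nested lookahead scan (which re-tests header lines) by a single flat pass keeping a pending header and a has-snippet flag, flushed on the next header and at the end.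
import Mathlib
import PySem

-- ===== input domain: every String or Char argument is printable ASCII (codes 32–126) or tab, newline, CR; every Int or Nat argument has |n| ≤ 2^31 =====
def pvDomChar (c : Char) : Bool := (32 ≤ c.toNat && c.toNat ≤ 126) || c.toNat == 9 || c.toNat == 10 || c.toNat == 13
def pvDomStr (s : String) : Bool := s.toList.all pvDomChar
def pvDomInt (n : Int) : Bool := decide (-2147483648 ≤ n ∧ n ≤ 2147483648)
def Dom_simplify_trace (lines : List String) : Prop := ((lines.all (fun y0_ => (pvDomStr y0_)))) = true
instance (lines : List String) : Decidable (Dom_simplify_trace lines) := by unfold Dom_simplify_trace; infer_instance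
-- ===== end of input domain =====

-- B replaces A's index-based outer loop with nested lookahead scan by one flat pass
-- over the lines keeping a pending header and a has-snippet flag (objective: simpler).

-- line.lstrip().startswith("#")
def stIsHeader (s : String) : Bool := PySem.Str.startswith (PySem.Str.lstrip s) "#"

-- ===== PORT A =====
-- inner while: while j < len(lines) and not lines[j].lstrip().startswith("#"): snippet_found = True; j += 1
def stInnerA (lines : List String) (j : Nat) (snip : Bool) : Nat × Bool :=
  if h : j < lines.length then
    if stIsHeader (lines[j]'h) then (j, snip)
    else stInnerA lines (j + 1) true
  else (j, snip)
termination_by lines.length - j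
decreasing_by omega

-- the inner while never moves j backwards (cited by stOuterA's termination proof)
theorem stInnerA_ge (lines : List String) (j : Nat) (snip : Bool) :
    j ≤ (stInnerA lines j snip).1 := by
  fun_induction stInnerA
  case case1 => simp
  case case2 => omega
  case case3 => simp

-- outer while over index i, accumulating 'simplified'
def stOuterA (lines : List String) (i : Nat) (acc : List String) : List String :=
  if h : i < lines.length then
    if stIsHeader (lines[i]'h) then
      match hm : stInnerA lines (i + 1) false with
      | (j, snip) =>
        stOuterA lines j (acc ++ [if snip then (lines[i]'h) ++ " ...." else lines[i]'h])
    else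
      stOuterA lines (i + 1) acc
  else acc
termination_by lines.length - i
decreasing_by
  · have := stInnerA_ge lines (i + 1) false
    rw [hm] at this
    simp at this
    omega
  · omega

def simplify_trace (lines : List String) : List String := stOuterA lines 0 []

-- ===== PORT B =====
-- flush of the pending header: current_header + " ...." if has_snippet else current_header
def stFlush (c : String) (has : Bool) : String := if has then c ++ " ...." else c

-- the flat pass: pending header (Option) + has_snippet flag, flushed on the next header and at the end
def stLoopB (rest : List String) (cur : Option String) (has : Bool) : List String :=
  match rest with
  | [] => match cur with | none => [] | some c => [stFlush c has]
  | l :: rest' =>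
    if stIsHeader l then
      match cur with
      | none => stLoopB rest' (some l) false
      | some c => stFlush c has :: stLoopB rest' (some l) false
    else
      match cur with
      | none => stLoopB rest' none has
      | some c => stLoopB rest' (some c) true

def simplify_trace_alt (lines : List String) : List String := stLoopB lines none false

-- ===== PRECONDITION & SPEC =====
def Spec_simplify_trace (lines : List String) (out : List String) : Prop := out = simplify_trace_alt lines
instance (lines : List String) (out : List String) : Decidable (Spec_simplify_trace lines out) := by unfold Spec_simplify_trace; infer_instance

-- ===== CLAIM (what is proved, stated in full; the proofs are below) =====
def Claim_equal_simplify_trace : Prop := ∀ (lines : List String), Dom_simplify_trace lines → Spec_simplify_trace lines (simplify_trace lines)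

-- ===== LEMMAS AND PROOFS =====

-- B's loop with a pending header equals: finish A's inner scan, flush, continue pending-free.
theorem stLoopB_pending (lines : List String) (k : Nat) (c : String) (has : Bool) :
    stLoopB (lines.drop k) (some c) has =
      stFlush c (stInnerA lines k has).2 :: stLoopB (lines.drop (stInnerA lines k has).1) none false := by
  fun_induction stInnerA lines k has
  case case1 h hh =>
    rw [List.drop_eq_getElem_cons h]
    simp [stLoopB, hh]
  case case2 h hh ih =>
    rw [List.drop_eq_getElem_cons h]
    simpa [stLoopB, hh] using ih
  case case3 h =>
    rw [List.drop_eq_nil_of_le (by omega)]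
    simp [stLoopB]

-- A's outer loop from index i equals acc ++ B's loop on the remaining lines.
theorem stOuterA_eq (lines : List String) (i : Nat) (acc : List String) :
    stOuterA lines i acc = acc ++ stLoopB (lines.drop i) none false := by
  fun_induction stOuterA
  case case1 hlt hhdr j snip hm ih =>
    simp only [dite_eq_ite] at ih
    rw [ih, List.drop_eq_getElem_cons hlt]
    simp only [stLoopB]
    rw [if_pos hhdr, stLoopB_pending lines _ _ false, hm]
    simp [stFlush]
  case case2 hlt hh ih =>
    rw [ih, List.drop_eq_getElem_cons hlt]
    simp only [stLoopB]
    rw [if_neg hh]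
  case case3 h =>
    rw [List.drop_eq_nil_of_le (by omega)]
    simp [stLoopB]

-- ===== VERDICT (by name: the statement is the Claim_ definition above) =====
theorem simplify_trace_spec : Claim_equal_simplify_trace := by
  intro lines _
  unfold Spec_simplify_trace simplify_trace simplify_trace_alt
  simpa using stOuterA_eq lines 0 []
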